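-- pv_equiv track=rewrite | github.com/avishkartt7/aria-voice-assistant | api/index.py | get_next_schedule
-- ===== SOURCE A (Python) =====
-- def get_next_schedule(current_hour, current_minute):
--     """Get next scheduled time as string"""
--     schedules = [
--         (12, 0, "12:00 PM"),
--         (12, 30, "12:30 PM"),
--         (13, 0, "1:00 PM"),
--         (14, 0, "2:00 PM"),
--         (15, 0, "3:00 PM"),
--         (16, 0, "4:00 PM"),
--         (16, 30, "4:30 PM"),
--         (17, 0, "5:00 PM"),
--         (17, 30, "5:30 PM"),
--         (18, 0, "6:00 PM"),
--         (18, 30, "6:30 PM"),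
--         (19, 0, "7:00 PM"),
--         (21, 0, "9:00 PM")
--     ]
--
--     for h, m, desc in schedules:
--         if (current_hour < h) or (current_hour == h and current_minute < m):
--             return desc
--
--     return "tomorrow 12:00 PM"
-- ===== SOURCE B (Python) =====
-- def get_next_schedule(current_hour, current_minute):
--     """Get next scheduled time as string"""
--     times = [(12, 0), (12, 30), (13, 0), (14, 0), (15, 0), (16, 0), (16, 30),
--              (17, 0), (17, 30), (18, 0), (18, 30), (19, 0), (21, 0)]
--     descs = ["12:00 PM", "12:30 PM", "1:00 PM", "2:00 PM", "3:00 PM", "4:00 PM",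
--              "4:30 PM", "5:00 PM", "5:30 PM", "6:00 PM", "6:30 PM", "7:00 PM", "9:00 PM"]
--     key = (current_hour, current_minute)
--     lo, hi = 0, len(times)
--     while lo < hi:  # bisect_right by hand (strict '<' on tuples = lexicographic)
--         mid = (lo + hi) // 2
--         if key < times[mid]:
--             hi = mid
--         else:
--             lo = mid + 1
--     return descs[lo] if lo < len(descs) else "tomorrow 12:00 PM"
-- ===== Notes on version B (the rewrite author's own statement) =====
-- stated objective: alternative
-- what changed: Replaced the linear scan over the 13 schedule tuples by a hand-written bisect_right binary search on a sorted list of (hour, minute) keys with the lexicographic tuple comparison, indexing a parallel description list.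
import Mathlib
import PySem

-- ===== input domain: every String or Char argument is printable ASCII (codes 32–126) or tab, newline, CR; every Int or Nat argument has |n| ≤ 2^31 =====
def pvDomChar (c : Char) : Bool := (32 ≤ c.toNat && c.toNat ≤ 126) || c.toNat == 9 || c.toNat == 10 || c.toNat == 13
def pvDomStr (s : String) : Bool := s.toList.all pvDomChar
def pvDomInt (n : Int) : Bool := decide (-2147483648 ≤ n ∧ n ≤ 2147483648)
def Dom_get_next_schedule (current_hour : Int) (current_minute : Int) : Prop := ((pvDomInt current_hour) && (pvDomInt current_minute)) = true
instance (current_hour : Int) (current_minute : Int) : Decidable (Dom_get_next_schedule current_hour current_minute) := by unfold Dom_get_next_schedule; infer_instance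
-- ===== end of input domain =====

-- B replaces A's linear scan by a binary search (bisect_right by hand, lexicographic
-- tuple order) over a sorted key list with a parallel description list; alternative, not faster.

-- ===== PORT A =====
-- the for-loop with early return, transliterated as recursion over the schedule list
def pvSchedLoop (current_hour : Int) (current_minute : Int) : List (Int × Int × String) → String
  | [] => "tomorrow 12:00 PM"
  | (h, m, desc) :: rest =>
      if current_hour < h ∨ (current_hour = h ∧ current_minute < m) then desc
      else pvSchedLoop current_hour current_minute rest

def get_next_schedule (current_hour : Int) (current_minute : Int) : String :=
  pvSchedLoop current_hour current_minute
    [(12, 0, "12:00 PM"), (12, 30, "12:30 PM"), (13, 0, "1:00 PM"), (14, 0, "2:00 PM"),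
     (15, 0, "3:00 PM"), (16, 0, "4:00 PM"), (16, 30, "4:30 PM"), (17, 0, "5:00 PM"),
     (17, 30, "5:30 PM"), (18, 0, "6:00 PM"), (18, 30, "6:30 PM"), (19, 0, "7:00 PM"),
     (21, 0, "9:00 PM")]

-- ===== PORT B =====
def pvTimes : List (Int × Int) :=
  [(12, 0), (12, 30), (13, 0), (14, 0), (15, 0), (16, 0), (16, 30),
   (17, 0), (17, 30), (18, 0), (18, 30), (19, 0), (21, 0)]

def pvDescs : List String :=
  ["12:00 PM", "12:30 PM", "1:00 PM", "2:00 PM", "3:00 PM", "4:00 PM",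
   "4:30 PM", "5:00 PM", "5:30 PM", "6:00 PM", "6:30 PM", "7:00 PM", "9:00 PM"]

-- Source B's while-loop: bisect_right with Python's lexicographic tuple '<' written out
def pvBisect (key : Int × Int) (lo hi : Nat) : Nat :=
  if lo < hi then
    let mid := (lo + hi) / 2
    let p := pvTimes.getD mid (0, 0)
    if key.1 < p.1 ∨ (key.1 = p.1 ∧ key.2 < p.2) then pvBisect key lo mid
    else pvBisect key (mid + 1) hi
  else lo
termination_by hi - lo
decreasing_by all_goals omega

def get_next_schedule_alt (current_hour : Int) (current_minute : Int) : String :=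
  let lo := pvBisect (current_hour, current_minute) 0 pvTimes.length
  if lo < pvDescs.length then pvDescs.getD lo "" else "tomorrow 12:00 PM"

-- ===== PRECONDITION & SPEC =====
def Spec_get_next_schedule (current_hour : Int) (current_minute : Int) (out : String) : Prop := out = get_next_schedule_alt current_hour current_minute
instance (current_hour : Int) (current_minute : Int) (out : String) : Decidable (Spec_get_next_schedule current_hour current_minute out) := by unfold Spec_get_next_schedule; infer_instance

-- ===== CLAIM (what is proved, stated in full; the proofs are below) =====
def Claim_equal_get_next_schedule : Prop := ∀ (current_hour : Int) (current_minute : Int), Dom_get_next_schedule current_hour current_minute → Spec_get_next_schedule current_hour current_minute (get_next_schedule current_hour current_minute)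

-- ===== LEMMAS AND PROOFS =====

-- ===== VERDICT (by name: the statement is the Claim_ definition above) =====
set_option maxHeartbeats 4000000 in
theorem get_next_schedule_spec : Claim_equal_get_next_schedule := by
  intro ch cm _
  show get_next_schedule ch cm = get_next_schedule_alt ch cm
  simp only [get_next_schedule, get_next_schedule_alt, pvTimes, pvDescs, pvSchedLoop]
  simp [pvBisect, pvTimes, pvDescs]
  by_cases h1 : (ch < 12 ∨ (ch = 12 ∧ cm < 0))
  · have c2 : (ch < 12 ∨ (ch = 12 ∧ cm < 30)) := by omega
    have c3 : (ch < 13 ∨ (ch = 13 ∧ cm < 0)) := by omega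
    have c4 : (ch < 14 ∨ (ch = 14 ∧ cm < 0)) := by omega
    have c5 : (ch < 15 ∨ (ch = 15 ∧ cm < 0)) := by omega
    have c6 : (ch < 16 ∨ (ch = 16 ∧ cm < 0)) := by omega
    have c7 : (ch < 16 ∨ (ch = 16 ∧ cm < 30)) := by omega
    have c8 : (ch < 17 ∨ (ch = 17 ∧ cm < 0)) := by omega
    have c9 : (ch < 17 ∨ (ch = 17 ∧ cm < 30)) := by omega
    have c10 : (ch < 18 ∨ (ch = 18 ∧ cm < 0)) := by omega
    have c11 : (ch < 18 ∨ (ch = 18 ∧ cm < 30)) := by omega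
    have c12 : (ch < 19 ∨ (ch = 19 ∧ cm < 0)) := by omega
    have c13 : (ch < 21 ∨ (ch = 21 ∧ cm < 0)) := by omega
    simp [h1, c2, c3, c4, c5, c6, c7, c8, c9, c10, c11, c12, c13]
  by_cases h2 : (ch < 12 ∨ (ch = 12 ∧ cm < 30))
  · have c3 : (ch < 13 ∨ (ch = 13 ∧ cm < 0)) := by omega
    have c4 : (ch < 14 ∨ (ch = 14 ∧ cm < 0)) := by omega
    have c5 : (ch < 15 ∨ (ch = 15 ∧ cm < 0)) := by omega
    have c6 : (ch < 16 ∨ (ch = 16 ∧ cm < 0)) := by omega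
    have c7 : (ch < 16 ∨ (ch = 16 ∧ cm < 30)) := by omega
    have c8 : (ch < 17 ∨ (ch = 17 ∧ cm < 0)) := by omega
    have c9 : (ch < 17 ∨ (ch = 17 ∧ cm < 30)) := by omega
    have c10 : (ch < 18 ∨ (ch = 18 ∧ cm < 0)) := by omega
    have c11 : (ch < 18 ∨ (ch = 18 ∧ cm < 30)) := by omega
    have c12 : (ch < 19 ∨ (ch = 19 ∧ cm < 0)) := by omega
    have c13 : (ch < 21 ∨ (ch = 21 ∧ cm < 0)) := by omega
    simp [h1, h2, c3, c4, c5, c6, c7, c8, c9, c10, c11, c12, c13]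
  by_cases h3 : (ch < 13 ∨ (ch = 13 ∧ cm < 0))
  · have c4 : (ch < 14 ∨ (ch = 14 ∧ cm < 0)) := by omega
    have c5 : (ch < 15 ∨ (ch = 15 ∧ cm < 0)) := by omega
    have c6 : (ch < 16 ∨ (ch = 16 ∧ cm < 0)) := by omega
    have c7 : (ch < 16 ∨ (ch = 16 ∧ cm < 30)) := by omega
    have c8 : (ch < 17 ∨ (ch = 17 ∧ cm < 0)) := by omega
    have c9 : (ch < 17 ∨ (ch = 17 ∧ cm < 30)) := by omega
    have c10 : (ch < 18 ∨ (ch = 18 ∧ cm < 0)) := by omega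
    have c11 : (ch < 18 ∨ (ch = 18 ∧ cm < 30)) := by omega
    have c12 : (ch < 19 ∨ (ch = 19 ∧ cm < 0)) := by omega
    have c13 : (ch < 21 ∨ (ch = 21 ∧ cm < 0)) := by omega
    simp [h1, h2, h3, c4, c5, c6, c7, c8, c9, c10, c11, c12, c13]
  by_cases h4 : (ch < 14 ∨ (ch = 14 ∧ cm < 0))
  · have c5 : (ch < 15 ∨ (ch = 15 ∧ cm < 0)) := by omega
    have c6 : (ch < 16 ∨ (ch = 16 ∧ cm < 0)) := by omega
    have c7 : (ch < 16 ∨ (ch = 16 ∧ cm < 30)) := by omega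
    have c8 : (ch < 17 ∨ (ch = 17 ∧ cm < 0)) := by omega
    have c9 : (ch < 17 ∨ (ch = 17 ∧ cm < 30)) := by omega
    have c10 : (ch < 18 ∨ (ch = 18 ∧ cm < 0)) := by omega
    have c11 : (ch < 18 ∨ (ch = 18 ∧ cm < 30)) := by omega
    have c12 : (ch < 19 ∨ (ch = 19 ∧ cm < 0)) := by omega
    have c13 : (ch < 21 ∨ (ch = 21 ∧ cm < 0)) := by omega
    simp [h1, h2, h3, h4, c5, c6, c7, c8, c9, c10, c11, c12, c13]
  by_cases h5 : (ch < 15 ∨ (ch = 15 ∧ cm < 0))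
  · have c6 : (ch < 16 ∨ (ch = 16 ∧ cm < 0)) := by omega
    have c7 : (ch < 16 ∨ (ch = 16 ∧ cm < 30)) := by omega
    have c8 : (ch < 17 ∨ (ch = 17 ∧ cm < 0)) := by omega
    have c9 : (ch < 17 ∨ (ch = 17 ∧ cm < 30)) := by omega
    have c10 : (ch < 18 ∨ (ch = 18 ∧ cm < 0)) := by omega
    have c11 : (ch < 18 ∨ (ch = 18 ∧ cm < 30)) := by omega
    have c12 : (ch < 19 ∨ (ch = 19 ∧ cm < 0)) := by omega
    have c13 : (ch < 21 ∨ (ch = 21 ∧ cm < 0)) := by omega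
    simp [h1, h2, h3, h4, h5, c6, c7, c8, c9, c10, c11, c12, c13]
  by_cases h6 : (ch < 16 ∨ (ch = 16 ∧ cm < 0))
  · have c7 : (ch < 16 ∨ (ch = 16 ∧ cm < 30)) := by omega
    have c8 : (ch < 17 ∨ (ch = 17 ∧ cm < 0)) := by omega
    have c9 : (ch < 17 ∨ (ch = 17 ∧ cm < 30)) := by omega
    have c10 : (ch < 18 ∨ (ch = 18 ∧ cm < 0)) := by omega
    have c11 : (ch < 18 ∨ (ch = 18 ∧ cm < 30)) := by omega
    have c12 : (ch < 19 ∨ (ch = 19 ∧ cm < 0)) := by omega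
    have c13 : (ch < 21 ∨ (ch = 21 ∧ cm < 0)) := by omega
    simp [h1, h2, h3, h4, h5, h6, c7, c8, c9, c10, c11, c12, c13]
  by_cases h7 : (ch < 16 ∨ (ch = 16 ∧ cm < 30))
  · have c8 : (ch < 17 ∨ (ch = 17 ∧ cm < 0)) := by omega
    have c9 : (ch < 17 ∨ (ch = 17 ∧ cm < 30)) := by omega
    have c10 : (ch < 18 ∨ (ch = 18 ∧ cm < 0)) := by omega
    have c11 : (ch < 18 ∨ (ch = 18 ∧ cm < 30)) := by omega
    have c12 : (ch < 19 ∨ (ch = 19 ∧ cm < 0)) := by omega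
    have c13 : (ch < 21 ∨ (ch = 21 ∧ cm < 0)) := by omega
    simp [h1, h2, h3, h4, h5, h6, h7, c8, c9, c10, c11, c12, c13]
  by_cases h8 : (ch < 17 ∨ (ch = 17 ∧ cm < 0))
  · have c9 : (ch < 17 ∨ (ch = 17 ∧ cm < 30)) := by omega
    have c10 : (ch < 18 ∨ (ch = 18 ∧ cm < 0)) := by omega
    have c11 : (ch < 18 ∨ (ch = 18 ∧ cm < 30)) := by omega
    have c12 : (ch < 19 ∨ (ch = 19 ∧ cm < 0)) := by omega
    have c13 : (ch < 21 ∨ (ch = 21 ∧ cm < 0)) := by omega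
    simp [h1, h2, h3, h4, h5, h6, h7, h8, c9, c10, c11, c12, c13]
  by_cases h9 : (ch < 17 ∨ (ch = 17 ∧ cm < 30))
  · have c10 : (ch < 18 ∨ (ch = 18 ∧ cm < 0)) := by omega
    have c11 : (ch < 18 ∨ (ch = 18 ∧ cm < 30)) := by omega
    have c12 : (ch < 19 ∨ (ch = 19 ∧ cm < 0)) := by omega
    have c13 : (ch < 21 ∨ (ch = 21 ∧ cm < 0)) := by omega
    simp [h1, h2, h3, h4, h5, h6, h7, h8, h9, c10, c11, c12, c13]
  by_cases h10 : (ch < 18 ∨ (ch = 18 ∧ cm < 0))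
  · have c11 : (ch < 18 ∨ (ch = 18 ∧ cm < 30)) := by omega
    have c12 : (ch < 19 ∨ (ch = 19 ∧ cm < 0)) := by omega
    have c13 : (ch < 21 ∨ (ch = 21 ∧ cm < 0)) := by omega
    simp [h1, h2, h3, h4, h5, h6, h7, h8, h9, h10, c11, c12, c13]
  by_cases h11 : (ch < 18 ∨ (ch = 18 ∧ cm < 30))
  · have c12 : (ch < 19 ∨ (ch = 19 ∧ cm < 0)) := by omega
    have c13 : (ch < 21 ∨ (ch = 21 ∧ cm < 0)) := by omega
    simp [h1, h2, h3, h4, h5, h6, h7, h8, h9, h10, h11, c12, c13]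
  by_cases h12 : (ch < 19 ∨ (ch = 19 ∧ cm < 0))
  · have c13 : (ch < 21 ∨ (ch = 21 ∧ cm < 0)) := by omega
    simp [h1, h2, h3, h4, h5, h6, h7, h8, h9, h10, h11, h12, c13]
  by_cases h13 : (ch < 21 ∨ (ch = 21 ∧ cm < 0))
  · simp [h1, h2, h3, h4, h5, h6, h7, h8, h9, h10, h11, h12, h13]
  simp [h1, h2, h3, h4, h5, h6, h7, h8, h9, h10, h11, h12, h13]
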